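-- pv_equiv track=rewrite | github.com/NLR-Distribution-Suite/ditto | src/ditto/readers/cim_iec_61968_13/queries.py | _sorted_phase_string
-- ===== SOURCE A (Python) =====
-- def _sorted_phase_string(phase_values: list) -> str | None:
--     phase_order = ["A", "B", "C", "N"]
--     phase_set = set()
--
--     for raw_phase in phase_values:
--         if raw_phase is None:
--             continue
--         phase_text = str(raw_phase).replace(",", "").upper()
--         phase_set.update({phase for phase in phase_text if phase in phase_order})
--
--     ordered_phases = [phase for phase in phase_order if phase in phase_set]
--     return ",".join(ordered_phases) if ordered_phases else None
-- ===== SOURCE B (Python) =====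
-- def _sorted_phase_string(phase_values: list) -> str | None:
--     result = [p for p in ["A", "B", "C", "N"]
--               if any(p in str(r).upper() for r in phase_values if r is not None)]
--     return ",".join(result) if result else None
-- ===== Notes on version B (the rewrite author's own statement) =====
-- stated objective: simpler
-- what changed: B drops A's accumulated set entirely: it loops over the fixed phase order and, per candidate phase, re-scans the inputs with a short-circuiting substring test (any(p in str(r).upper())), instead of A's build-a-set-then-filter pass; the comma removal is dropped since a comma can never equal a phase letter.
import Mathlib
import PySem

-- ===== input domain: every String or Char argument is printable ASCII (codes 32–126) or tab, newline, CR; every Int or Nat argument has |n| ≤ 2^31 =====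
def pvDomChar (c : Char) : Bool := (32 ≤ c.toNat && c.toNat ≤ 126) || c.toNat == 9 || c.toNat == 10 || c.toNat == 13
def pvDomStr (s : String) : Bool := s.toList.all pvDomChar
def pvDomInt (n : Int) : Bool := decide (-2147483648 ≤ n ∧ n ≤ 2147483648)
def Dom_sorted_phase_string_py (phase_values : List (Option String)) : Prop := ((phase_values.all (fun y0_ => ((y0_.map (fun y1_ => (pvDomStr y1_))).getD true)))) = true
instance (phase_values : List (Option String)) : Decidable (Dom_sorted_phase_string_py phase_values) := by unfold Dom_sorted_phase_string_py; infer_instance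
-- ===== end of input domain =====

-- B re-implements A without the accumulated set: it scans the inputs once per candidate
-- phase letter with a substring test, instead of A's build-a-set-then-filter pass ("simpler").

-- ===== PORT A =====
def sorted_phase_string_py (phase_values : List (Option String)) : Option String :=
  let phase_order : List Char := ['A', 'B', 'C', 'N']
  let phase_set : PySem.Set Char :=
    phase_values.foldl (fun s raw_phase =>
      match raw_phase with
      | none => s
      | some raw =>
        let phase_text := PySem.Str.upper (PySem.Str.replace raw "," "")
        PySem.Set.update s
          (PySem.Set.ofList (phase_text.toList.filter (fun p => phase_order.contains p))))
      PySem.Set.empty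
  let ordered_phases := phase_order.filter (fun p => PySem.Set.contains phase_set p)
  if ordered_phases.isEmpty then none
  else some (PySem.Str.join "," (ordered_phases.map (fun c => String.ofList [c])))

-- ===== PORT B =====
def sorted_phase_string_py_alt (phase_values : List (Option String)) : Option String :=
  let result := (['A', 'B', 'C', 'N'] : List Char).filter (fun p =>
    phase_values.any (fun r =>
      match r with
      | none => false
      | some s => PySem.Str.isIn (String.ofList [p]) (PySem.Str.upper s)))
  if result.isEmpty then none
  else some (PySem.Str.join "," (result.map (fun c => String.ofList [c])))

-- ===== PRECONDITION & SPEC =====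
def Spec_sorted_phase_string_py (phase_values : List (Option String)) (out : Option String) : Prop := out = sorted_phase_string_py_alt phase_values
instance (phase_values : List (Option String)) (out : Option String) : Decidable (Spec_sorted_phase_string_py phase_values out) := by unfold Spec_sorted_phase_string_py; infer_instance

-- ===== CLAIM (what is proved, stated in full; the proofs are below) =====
def Claim_equal_sorted_phase_string_py : Prop := ∀ (phase_values : List (Option String)), Dom_sorted_phase_string_py phase_values → Spec_sorted_phase_string_py phase_values (sorted_phase_string_py phase_values)

-- ===== LEMMAS AND PROOFS =====

theorem infix_singleton_iff_mem (p : Char) (l : List Char) : [p] <:+: l ↔ p ∈ l := by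
  constructor
  · intro h; exact h.subset (List.mem_singleton_self p)
  · intro h
    obtain ⟨s, t, rfl⟩ := List.append_of_mem h
    exact ⟨s, t, by simp⟩

-- membership through A's comma-removal `replace raw "," ""`, for a non-comma character
theorem mem_replace_go_comma (p : Char) (hp : p ≠ ',') :
    ∀ (fuel : Nat) (l acc : List Char),
      p ∈ PySem.Chars.replace.go [','] [] fuel l acc ↔ p ∈ acc ∨ p ∈ l := by
  intro fuel
  induction fuel with
  | zero => intro l acc; simp [PySem.Chars.replace.go]
  | succ n ih =>
    intro l acc
    cases l with
    | nil => simp [PySem.Chars.replace.go]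
    | cons c t =>
      rw [PySem.Chars.replace.go]
      by_cases hc : c = ','
      · subst hc
        simp only [List.isPrefixOf_cons₂, List.isPrefixOf_nil_left, if_true, BEq.rfl,
          Bool.and_self, List.reverse_nil, List.nil_append, ih]
        simp [hp, List.mem_cons]
      · have hpref : (List.isPrefixOf [','] (c :: t)) = false := by
          simp only [List.isPrefixOf_cons₂, List.isPrefixOf_nil_left, Bool.and_true]
          exact beq_eq_false_iff_ne.mpr (fun h => hc h.symm)
        simp only [hpref, Bool.false_eq_true, if_false, ih]
        simp [List.mem_cons, or_assoc, or_left_comm]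

theorem mem_replace_comma (p : Char) (hp : p ≠ ',') (cs : List Char) :
    p ∈ PySem.Chars.replace cs [','] [] ↔ p ∈ cs := by
  rw [PySem.Chars.replace]
  simp only [List.isEmpty_cons, Bool.false_eq_true, if_false]
  rw [mem_replace_go_comma p hp]
  simp

-- membership in the final phase set, as a scan over the inputs
theorem mem_foldl_update (p : Char) (pv : List (Option String)) (s : PySem.Set Char) :
    p ∈ pv.foldl (fun s raw_phase =>
      match raw_phase with
      | none => s
      | some raw =>
        PySem.Set.update s
          (PySem.Set.ofList ((PySem.Str.upper (PySem.Str.replace raw "," "")).toList.filter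
            (fun q => (['A','B','C','N'] : List Char).contains q)))) s
    ↔ p ∈ s ∨ ∃ raw, some raw ∈ pv ∧
        p ∈ (PySem.Str.upper (PySem.Str.replace raw "," "")).toList.filter
            (fun q => (['A','B','C','N'] : List Char).contains q) := by
  induction pv generalizing s with
  | nil => simp
  | cons r t ih =>
    cases r with
    | none =>
      rw [List.foldl_cons, ih]
      constructor
      · rintro (h | ⟨w, hw, hm⟩)
        · exact Or.inl h
        · exact Or.inr ⟨w, List.mem_cons_of_mem _ hw, hm⟩
      · rintro (h | ⟨w, hw, hm⟩)
        · exact Or.inl h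
        · rcases List.mem_cons.mp hw with h1 | h1
          · cases h1
          · exact Or.inr ⟨w, h1, hm⟩
    | some raw =>
      rw [List.foldl_cons, ih, PySem.Set.mem_update, PySem.Set.mem_ofList]
      constructor
      · rintro ((h | h) | ⟨w, hw, hm⟩)
        · exact Or.inl h
        · exact Or.inr ⟨raw, List.mem_cons_self, h⟩
        · exact Or.inr ⟨w, List.mem_cons_of_mem _ hw, hm⟩
      · rintro (h | ⟨w, hw, hm⟩)
        · exact Or.inl (Or.inl h)
        · rcases List.mem_cons.mp hw with h1 | h1
          · obtain rfl : w = raw := Option.some.inj h1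
            exact Or.inl (Or.inr hm)
          · exact Or.inr ⟨w, h1, hm⟩

theorem per_string (p : Char) (hp : p ∈ (['A','B','C','N'] : List Char)) (raw : String) :
    (p ∈ (PySem.Str.upper (PySem.Str.replace raw "," "")).toList.filter
        (fun q => (['A','B','C','N'] : List Char).contains q))
    ↔ PySem.Str.isIn (String.ofList [p]) (PySem.Str.upper raw) = true := by
  have hp' : p ≠ ',' := by
    rcases (by simpa using hp : p = 'A' ∨ p = 'B' ∨ p = 'C' ∨ p = 'N') with rfl | rfl | rfl | rfl <;> decide
  rw [PySem.Str.isIn_iff_infix]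
  have hmk : (String.ofList [p]).toList = [p] := by simp
  rw [hmk, infix_singleton_iff_mem]
  simp only [List.mem_filter, PySem.Str.upper, PySem.Str.replace]
  have htl : ∀ l : List Char, (String.ofList l).toList = l := by intro l; simp
  rw [PySem.Chars.upper, PySem.Chars.upper]
  simp only [htl, List.mem_map]
  constructor
  · rintro ⟨⟨c, hc, rfl⟩, _⟩
    have hc' : c ≠ ',' := by
      rintro rfl; exact hp' (by decide)
    exact ⟨c, (mem_replace_comma c hc' _).mp (by simpa using hc), rfl⟩
  · rintro ⟨c, hc, rfl⟩
    have hc' : c ≠ ',' := by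
      rintro rfl; exact hp' (by decide)
    refine ⟨⟨c, (mem_replace_comma c hc' _).mpr (by simpa using hc), rfl⟩, ?_⟩
    simpa using hp

-- ===== VERDICT (by name: the statement is the Claim_ definition above) =====
theorem sorted_phase_string_py_spec : Claim_equal_sorted_phase_string_py := by
  intro pv _
  unfold Spec_sorted_phase_string_py sorted_phase_string_py sorted_phase_string_py_alt
  have hfilter :
      (['A','B','C','N'] : List Char).filter (fun p => PySem.Set.contains
        (pv.foldl (fun s raw_phase =>
          match raw_phase with
          | none => s
          | some raw =>
            PySem.Set.update s
              (PySem.Set.ofList ((PySem.Str.upper (PySem.Str.replace raw "," "")).toList.filter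
                (fun q => (['A','B','C','N'] : List Char).contains q)))) PySem.Set.empty) p)
      = (['A','B','C','N'] : List Char).filter (fun p =>
          pv.any (fun r =>
            match r with
            | none => false
            | some s => PySem.Str.isIn (String.ofList [p]) (PySem.Str.upper s))) := by
    apply List.filter_congr
    intro p hp
    rw [Bool.eq_iff_iff]
    rw [PySem.Set.contains_iff, mem_foldl_update, List.any_eq_true]
    constructor
    · rintro (h | ⟨raw, hraw, hm⟩)
      · cases h
      · exact ⟨some raw, hraw, (per_string p hp raw).mp hm⟩
    · rintro ⟨r, hr, hh⟩
      cases r with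
      | none => cases hh
      | some raw => exact Or.inr ⟨raw, hr, (per_string p hp raw).mpr hh⟩
  simp only [hfilter]
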